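-- pv_equiv track=rewrite | github.com/smallyunet/dark20 | vanity_burn.py | calculate_beauty
-- ===== SOURCE A (Python) =====
-- def calculate_beauty(address: str) -> int:
--     """Calculate aesthetic score."""
--     score = 0
--
--     # Count 1s
--     ones = address.count('1')
--     score += ones * 5
--
--     # Consecutive 1s
--     max_consec = 0
--     current = 0
--     for c in address:
--         if c == '1':
--             current += 1
--             max_consec = max(max_consec, current)
--         else:
--             current = 0
--     score += max_consec * 10
--
--     # Repeating suffix
--     if len(address) >= 3 and address[-1] == address[-2] == address[-3]:
--         score += 25
--
--     # Penalize lowercase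
--     score -= sum(1 for c in address if c.islower())
--
--     return score
-- ===== SOURCE B (Python) =====
-- def calculate_beauty(address: str) -> int:
--     """Longest 1-run found by growing a '1'*k substring probe instead of a run scan."""
--     score = address.count('1') * 5
--     k = 0
--     while '1' * (k + 1) in address:
--         k += 1
--     score += k * 10
--     if len(address) >= 3 and address[-1] == address[-2] == address[-3]:
--         score += 25
--     return score - sum(c.islower() for c in address)
-- ===== Notes on version B (the rewrite author's own statement) =====
-- stated objective: alternative
-- what changed: Replaces A's linear run-scan (current/max counters over every character) for the longest consecutive-ones run by a growing substring-membership probe: keep incrementing k while a block of k+1 ones occurs in the address, correct because such a block is a substring iff some run of ones has length at least k+1.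
import Mathlib
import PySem

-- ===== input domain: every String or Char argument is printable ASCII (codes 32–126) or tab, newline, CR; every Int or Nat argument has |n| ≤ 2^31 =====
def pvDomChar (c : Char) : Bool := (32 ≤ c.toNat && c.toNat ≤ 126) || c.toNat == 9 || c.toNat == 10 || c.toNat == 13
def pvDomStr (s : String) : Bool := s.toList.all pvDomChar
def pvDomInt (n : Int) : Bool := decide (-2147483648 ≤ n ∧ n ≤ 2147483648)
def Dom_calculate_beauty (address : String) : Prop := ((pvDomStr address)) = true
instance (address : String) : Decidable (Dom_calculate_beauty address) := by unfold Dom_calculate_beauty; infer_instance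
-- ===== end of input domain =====

-- B replaces A's linear run-scan for the longest consecutive-1 run by a growing
-- substring-membership probe ('1'*(k+1) in address); 'alternative' objective.

-- ===== PORT A =====
def calculate_beauty (address : String) : Int :=
  let score : Int := 0
  let ones : Int := (PySem.Str.count address "1" : Int)
  let score := score + ones * 5
  let mc := address.toList.foldl
    (fun (p : Int × Int) c =>
      if c == '1' then (max p.1 (p.2 + 1), p.2 + 1) else (p.1, 0)) (0, 0)
  let score := score + mc.1 * 10
  let score :=
    if 3 ≤ PySem.Str.len address ∧
        PySem.List.pyGetD address.toList (-1) ' ' = PySem.List.pyGetD address.toList (-2) ' ' ∧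
        PySem.List.pyGetD address.toList (-2) ' ' = PySem.List.pyGetD address.toList (-3) ' '
    then score + 25 else score
  let score := score -
    ((address.toList.filter (fun c => PySem.Chars.islower c)).map (fun _ => (1 : Int))).sum
  score

-- ===== PORT B =====
-- cited by probe's decreasing_by: a successful probe of '1'*(k+1) bounds k
lemma pvProbe_lt (cs : List Char) (k : Nat)
    (h : PySem.Chars.isIn (PySem.List.pyRepeat ['1'] ((k : Int) + 1)) cs = true) :
    k + 1 ≤ cs.length := by
  rw [PySem.List.pyRepeat_singleton] at h
  rw [show ((k : Int) + 1).toNat = k + 1 by omega] at h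
  rw [PySem.Chars.isIn_iff_infix] at h
  have := h.length_le
  simpa using this

-- the while loop: grow k while '1' * (k + 1) is a substring of address
def probe (cs : List Char) (k : Nat) : Nat :=
  if h : PySem.Chars.isIn (PySem.List.pyRepeat ['1'] ((k : Int) + 1)) cs then
    probe cs (k + 1)
  else k
termination_by cs.length + 1 - k
decreasing_by have := pvProbe_lt cs k h; omega

def calculate_beauty_alt (address : String) : Int :=
  let score : Int := (PySem.Str.count address "1" : Int) * 5
  let k := probe address.toList 0
  let score := score + (k : Int) * 10
  let score :=
    if 3 ≤ PySem.Str.len address ∧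
        PySem.List.pyGetD address.toList (-1) ' ' = PySem.List.pyGetD address.toList (-2) ' ' ∧
        PySem.List.pyGetD address.toList (-2) ' ' = PySem.List.pyGetD address.toList (-3) ' '
    then score + 25 else score
  score - (address.toList.map (fun c => if PySem.Chars.islower c then (1 : Int) else 0)).sum

-- ===== PRECONDITION & SPEC =====
def Spec_calculate_beauty (address : String) (out : Int) : Prop := out = calculate_beauty_alt address
instance (address : String) (out : Int) : Decidable (Spec_calculate_beauty address out) := by unfold Spec_calculate_beauty; infer_instance

-- ===== CLAIM (what is proved, stated in full; the proofs are below) =====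
def Claim_equal_calculate_beauty : Prop := ∀ (address : String), Dom_calculate_beauty address → Spec_calculate_beauty address (calculate_beauty address)

-- ===== LEMMAS AND PROOFS =====

-- spec of the longest run of '1's in cs, extended by an incoming run of length c
def best1 : Nat → List Char → Nat
  | c, [] => c
  | c, x :: t => if x == '1' then best1 (c + 1) t else max c (best1 0 t)

-- trailing-run counter of A's fold
def lead1 : Nat → List Char → Nat
  | c, [] => c
  | c, x :: t => lead1 (if x == '1' then c + 1 else 0) t

lemma le_best1 (u : List Char) : ∀ c : Nat, c ≤ best1 c u := by
  induction u with
  | nil => intro c; simp [best1]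
  | cons x t ih =>
    intro c
    by_cases hx : (x == '1') = true
    · simpa [best1, hx] using le_trans (Nat.le_succ c) (ih (c + 1))
    · simp [best1, hx]

lemma fold_best (cs : List Char) : ∀ (m c : Nat), c ≤ m →
    cs.foldl
      (fun (p : Int × Int) c =>
        if c == '1' then (max p.1 (p.2 + 1), p.2 + 1) else (p.1, 0))
      ((m : Int), (c : Int))
    = (((max m (best1 c cs) : Nat) : Int), ((lead1 c cs : Nat) : Int)) := by
  induction cs with
  | nil =>
    intro m c h
    simp [best1, lead1, Nat.max_eq_left h]
  | cons x t ih =>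
    intro m c h
    by_cases hx : (x == '1') = true
    · simp only [List.foldl_cons, hx, if_pos]
      rw [show ((max (m : Int) ((c : Int) + 1)), ((c : Int) + 1))
            = (((max m (c + 1) : Nat) : Int), (((c + 1 : Nat)) : Int)) by push_cast; rfl]
      rw [ih (max m (c + 1)) (c + 1) (Nat.le_max_right _ _)]
      simp only [best1, lead1, hx, if_pos]
      rw [Nat.max_assoc, Nat.max_eq_right (le_best1 t (c + 1))]
    · simp only [List.foldl_cons, hx, Bool.false_eq_true, if_false]
      rw [show ((m : Int), (0 : Int)) = (((m : Nat) : Int), (((0 : Nat)) : Int)) by push_cast; rfl]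
      rw [ih m 0 (Nat.zero_le _)]
      simp only [best1, lead1, hx, Bool.false_eq_true, if_false]
      rw [← Nat.max_assoc, Nat.max_eq_left h]

lemma fold_best0 (cs : List Char) :
    cs.foldl
      (fun (p : Int × Int) c =>
        if c == '1' then (max p.1 (p.2 + 1), p.2 + 1) else (p.1, 0)) (0, 0)
    = (((best1 0 cs : Nat) : Int), ((lead1 0 cs : Nat) : Int)) := by
  have h := fold_best cs 0 0 le_rfl
  simpa using h

lemma rep_append_cons (c : Nat) (t : List Char) :
    List.replicate c '1' ++ '1' :: t = List.replicate (c + 1) '1' ++ t := by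
  simp [List.replicate_succ', List.append_assoc]

lemma pre_le (x : Char) (hx : x ≠ '1') (c j : Nat) (t : List Char)
    (h : List.replicate j '1' <+: List.replicate c '1' ++ x :: t) : j ≤ c := by
  induction c generalizing j t with
  | zero =>
    cases j with
    | zero => exact Nat.le_refl 0
    | succ j =>
      rw [List.replicate_succ] at h
      simp only [List.replicate_zero, List.nil_append] at h
      rw [List.cons_prefix_cons] at h
      exact absurd h.1.symm hx
  | succ c ih =>
    cases j with
    | zero => exact Nat.zero_le _
    | succ j =>
      rw [List.replicate_succ, List.replicate_succ, List.cons_append,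
          List.cons_prefix_cons] at h
      exact Nat.succ_le_succ (ih j t h.2)
/-- an all-'1' infix of `replicate c '1' ++ x :: t` (x ≠ '1') fits in the front block or in t -/
lemma split_inf (x : Char) (hx : x ≠ '1') (c j : Nat) (t : List Char)
    (h : List.replicate j '1' <:+: List.replicate c '1' ++ x :: t) :
    j ≤ c ∨ List.replicate j '1' <:+: t := by
  induction c generalizing j with
  | zero =>
    simp only [List.replicate_zero, List.nil_append] at h
    rcases List.infix_cons_iff.mp h with hp | hi
    · exact Or.inl (pre_le x hx 0 j t (by simpa using hp))
    · exact Or.inr hi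
  | succ c ih =>
    rw [List.replicate_succ, List.cons_append] at h
    rcases List.infix_cons_iff.mp h with hp | hi
    · left
      exact pre_le x hx (c + 1) j t
        (by rw [List.replicate_succ, List.cons_append]; exact hp)
    · rcases ih j hi with hle | hinf
      · exact Or.inl (Nat.le_succ_of_le hle)
      · exact Or.inr hinf

lemma inf_best (u : List Char) : ∀ c : Nat,
    List.replicate (best1 c u) '1' <:+: List.replicate c '1' ++ u := by
  induction u with
  | nil => intro c; simp [best1]
  | cons x t ih =>
    intro c
    by_cases hx : (x == '1') = true
    · have hx' : x = '1' := by simpa using hx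
      subst hx'
      rw [rep_append_cons]
      simpa [best1] using ih (c + 1)
    · simp only [best1, hx, Bool.false_eq_true, if_false]
      by_cases hle : best1 0 t ≤ c
      · rw [Nat.max_eq_left hle]
        exact (List.prefix_append _ _).isInfix
      · rw [Nat.max_eq_right (Nat.le_of_not_le hle)]
        have h1 : List.replicate (best1 0 t) '1' <:+: t := by simpa using ih 0
        have h2 : t <:+: List.replicate c '1' ++ x :: t := by
          exact ((List.suffix_cons x t).trans (List.suffix_append _ _)).isInfix
        exact h1.trans h2

lemma best_inf (u : List Char) : ∀ (j c : Nat),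
    List.replicate j '1' <:+: List.replicate c '1' ++ u → j ≤ best1 c u := by
  induction u with
  | nil =>
    intro j c h
    have := h.length_le
    simpa [best1] using this
  | cons x t ih =>
    intro j c h
    by_cases hx : (x == '1') = true
    · have hx' : x = '1' := by simpa using hx
      subst hx'
      rw [rep_append_cons] at h
      simpa [best1] using ih j (c + 1) h
    · have hx' : x ≠ '1' := by simpa using hx
      simp only [best1, hx, Bool.false_eq_true, if_false]
      rcases split_inf x hx' c j t h with hle | hinf
      · exact le_trans hle (Nat.le_max_left _ _)
      · exact le_trans (ih j 0 (by simpa using hinf)) (Nat.le_max_right _ _)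

lemma inf_iff (cs : List Char) (j : Nat) :
    List.replicate j '1' <:+: cs ↔ j ≤ best1 0 cs := by
  constructor
  · intro h
    exact best_inf cs j 0 (by simpa using h)
  · intro h
    have hp : List.replicate j '1' <+: List.replicate (best1 0 cs) '1' := by
      rw [show best1 0 cs = j + (best1 0 cs - j) by omega, List.replicate_add]
      exact List.prefix_append _ _
    have hi : List.replicate (best1 0 cs) '1' <:+: cs := by simpa using inf_best cs 0
    exact hp.isInfix.trans hi

lemma probe_isIn_iff (cs : List Char) (k : Nat) :
    PySem.Chars.isIn (PySem.List.pyRepeat ['1'] ((k : Int) + 1)) cs = true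
      ↔ k + 1 ≤ best1 0 cs := by
  rw [PySem.List.pyRepeat_singleton, show ((k : Int) + 1).toNat = k + 1 by omega,
      PySem.Chars.isIn_iff_infix, inf_iff]

lemma probe_eq (cs : List Char) : ∀ (n k : Nat), best1 0 cs ≤ k + n → k ≤ best1 0 cs →
    probe cs k = best1 0 cs := by
  intro n
  induction n with
  | zero =>
    intro k h1 h2
    have hk : k = best1 0 cs := by omega
    rw [probe, dif_neg]
    · exact hk
    · intro h
      rw [probe_isIn_iff] at h
      omega
  | succ n ih =>
    intro k h1 h2
    rw [probe]
    by_cases h : PySem.Chars.isIn (PySem.List.pyRepeat ['1'] ((k : Int) + 1)) cs = true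
    · rw [dif_pos h]
      rw [probe_isIn_iff] at h
      exact ih (k + 1) (by omega) (by omega)
    · rw [dif_neg h]
      rw [probe_isIn_iff] at h
      omega

lemma probe_zero (cs : List Char) : probe cs 0 = best1 0 cs :=
  probe_eq cs (best1 0 cs) 0 (by omega) (Nat.zero_le _)

-- ===== VERDICT (by name: the statement is the Claim_ definition above) =====
theorem calculate_beauty_spec : Claim_equal_calculate_beauty := by
  intro address _
  unfold Spec_calculate_beauty calculate_beauty calculate_beauty_alt
  simp only []
  rw [fold_best0, probe_zero]
  have hsum : ((address.toList.filter (fun c => PySem.Chars.islower c)).map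
      (fun _ => (1 : Int))).sum
      = (address.toList.countP (fun c => PySem.Chars.islower c) : Int) := by
    simp [List.countP_eq_length_filter]
  rw [hsum, PySem.List.sum_map_ite_one_zero]
  split_ifs <;> ring
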